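-- pv_equiv track=rewrite | github.com/SalamanderKrajza/ai_devs4_python | tasks/S02E03/S02E03_not_working.py | prioritize_lines
-- ===== SOURCE A (Python) =====
-- def prioritize_lines(lines: list[str], focus_terms: set[str]) -> list[tuple[int, str]]:
--     """Score lines by focus term hits for budget trimming."""
--     result = []
--     for line in lines:
--         lower = line.lower()
--         score = sum(1 for term in focus_terms if term.lower() in lower)
--         result.append((score, line))
--     result.sort(key=lambda x: -x[0])
--     return result
-- ===== SOURCE B (Python) =====
-- def prioritize_lines(lines: list[str], focus_terms: set[str]) -> list[tuple[int, str]]: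
--     """Score lines by focus term hits; bucket sort by score instead of list.sort."""
--     terms = [t.lower() for t in focus_terms]
--     scored = []
--     for line in lines:
--         lower = line.lower()
--         scored.append((sum(1 for t in terms if t in lower), line))
--     out = []
--     for k in range(len(terms), -1, -1):
--         out.extend(p for p in scored if p[0] == k)
--     return out
-- ===== Notes on version B (the rewrite author's own statement) =====
-- stated objective: alternative
-- what changed: Replaces the comparison sort (result.sort with key=-score) by a counting/bucket pass: scores are bounded by len(focus_terms), so the output is built by emitting, for each score from the maximum down to 0, the lines with that score in input order, which reproduces the stable sort exactly; term lowercasing is also hoisted out of the per-line loop.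
import Mathlib
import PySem

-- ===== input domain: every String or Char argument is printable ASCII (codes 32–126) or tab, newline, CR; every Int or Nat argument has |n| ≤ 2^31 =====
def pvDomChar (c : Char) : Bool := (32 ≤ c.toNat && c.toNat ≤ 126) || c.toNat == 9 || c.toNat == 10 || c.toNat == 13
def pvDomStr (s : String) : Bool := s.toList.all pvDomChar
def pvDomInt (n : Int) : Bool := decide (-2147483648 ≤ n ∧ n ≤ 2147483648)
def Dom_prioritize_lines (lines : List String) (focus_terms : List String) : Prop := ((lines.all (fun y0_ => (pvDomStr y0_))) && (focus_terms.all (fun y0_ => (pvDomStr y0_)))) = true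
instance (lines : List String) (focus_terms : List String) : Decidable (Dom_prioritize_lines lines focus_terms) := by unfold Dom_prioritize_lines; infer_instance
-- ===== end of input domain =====

-- B replaces the stable comparison sort by a bucket pass over the bounded scores (same values, same order); it is an alternative of similar cost, not claimed faster.

-- ===== PORT A =====
def prioritize_lines (lines : List String) (focus_terms : List String) : List (Int × String) :=
  let result : List (Int × String) := lines.foldl (fun result line =>
    let lower := PySem.Str.lower line
    let score : Int := focus_terms.foldl
      (fun s term => if PySem.Str.isIn (PySem.Str.lower term) lower then s + 1 else s) 0
    result ++ [(score, line)]) []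
  PySem.List.sorted result (fun x => -x.1)

-- ===== PORT B =====
def prioritize_lines_alt (lines : List String) (focus_terms : List String) : List (Int × String) :=
  let terms := focus_terms.map PySem.Str.lower
  let scored : List (Int × String) := lines.foldl (fun scored line =>
    let lower := PySem.Str.lower line
    scored ++ [(terms.foldl (fun s t => if PySem.Str.isIn t lower then s + 1 else s) 0, line)]) []
  (PySem.List.pyRange (terms.length : Int) (-1) (-1)).foldl
    (fun out k => out ++ scored.filter (fun p => p.1 == k)) []

-- ===== PRECONDITION & SPEC =====
def Spec_prioritize_lines (lines : List String) (focus_terms : List String) (out : List (Int × String)) : Prop := out = prioritize_lines_alt lines focus_terms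
instance (lines : List String) (focus_terms : List String) (out : List (Int × String)) : Decidable (Spec_prioritize_lines lines focus_terms out) := by unfold Spec_prioritize_lines; infer_instance

-- ===== CLAIM (what is proved, stated in full; the proofs are below) =====
def Claim_equal_prioritize_lines : Prop := ∀ (lines : List String) (focus_terms : List String), Dom_prioritize_lines lines focus_terms → Spec_prioritize_lines lines focus_terms (prioritize_lines lines focus_terms)

-- ===== LEMMAS AND PROOFS =====

-- a score accumulated from `init` is between `init` and `init + length`
theorem pv_score_bounds (ts : List String) (f : String → Bool) : ∀ init : Int,
    init ≤ ts.foldl (fun s t => if f t then s + 1 else s) init ∧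
    ts.foldl (fun s t => if f t then s + 1 else s) init ≤ init + ts.length := by
  induction ts with
  | nil => intro init; simp
  | cons t ts ih =>
    intro init
    simp only [List.foldl_cons, List.length_cons]
    rcases ih (if f t then init + 1 else init) with ⟨h1, h2⟩
    split_ifs at h1 h2 ⊢ <;> constructor <;> omega

theorem pv_insertBy_pass {α : Type} (before : α → α → Bool) (x : α) (A B : List α)
    (hA : ∀ y ∈ A, before x y = false) :
    PySem.List.insertBy before x (A ++ B) = A ++ PySem.List.insertBy before x B := by
  induction A with
  | nil => simp
  | cons a A ih =>
    simp only [List.cons_append, PySem.List.insertBy, hA a (by simp)]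
    simp only [Bool.false_eq_true, if_false]
    rw [ih (fun y hy => hA y (by simp [hy]))]

theorem pv_insertBy_head {α : Type} (before : α → α → Bool) (x : α) (B : List α)
    (hB : ∀ y ∈ B, before x y = true) :
    PySem.List.insertBy before x B = x :: B := by
  cases B with
  | nil => rfl
  | cons b B => simp [PySem.List.insertBy, hB b (by simp)]

-- inserting x into descending buckets lands it at the end of its own bucket
theorem pv_ins_flatMap (x : Int × String) (xs : List (Int × String)) :
    ∀ ks : List Int, ks.Pairwise (fun a b => b < a) → x.1 ∈ ks →
    PySem.List.insertBy (fun a b => decide ((-a.1 : Int) < -b.1)) x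
        (ks.flatMap (fun k => xs.filter (fun p => p.1 == k)))
      = ks.flatMap (fun k => (xs ++ [x]).filter (fun p => p.1 == k)) := by
  intro ks
  induction ks with
  | nil => intro _ h; simp at h
  | cons k ks ih =>
    intro hpw hmem
    have hks : ∀ k' ∈ ks, k' < k := by
      intro k' hk'; exact (List.pairwise_cons.mp hpw).1 k' hk'
    have hfx : ∀ k' : Int, (xs ++ [x]).filter (fun p => p.1 == k')
        = xs.filter (fun p => p.1 == k') ++ (if x.1 == k' then [x] else []) := by
      intro k'; simp [List.filter_append, List.filter_cons]
    by_cases hx : x.1 = k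
    · -- x belongs to the head bucket: skip that bucket, then insert before everything else
      have hA : ∀ y ∈ xs.filter (fun p => p.1 == k), (decide ((-x.1 : Int) < -y.1)) = false := by
        intro y hy
        have : y.1 = k := by simpa using (List.mem_filter.mp hy).2
        simp [this, hx]
      have hB : ∀ y ∈ ks.flatMap (fun k' => xs.filter (fun p => p.1 == k')),
          (decide ((-x.1 : Int) < -y.1)) = true := by
        intro y hy
        rcases List.mem_flatMap.mp hy with ⟨k', hk', hyf⟩
        have : y.1 = k' := by simpa using (List.mem_filter.mp hyf).2
        have h2 := hks k' hk'
        simp only [decide_eq_true_eq, this, hx]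
        omega
      rw [List.flatMap_cons, pv_insertBy_pass _ _ _ _ hA, pv_insertBy_head _ _ _ hB]
      rw [List.flatMap_cons, hfx k]
      simp only [hx, beq_self_eq_true, if_true]
      have htail : ks.flatMap (fun k' => (xs ++ [x]).filter (fun p => p.1 == k'))
          = ks.flatMap (fun k' => xs.filter (fun p => p.1 == k')) := by
        apply List.flatMap_congr
        intro k' hk'
        rw [hfx k']
        have hlt := hks k' hk'
        have hne : ¬ (x.1 == k') = true := by simp [hx]; omega
        simp [hne]
      rw [htail]; simp
    · -- x is in a later bucket
      have hmem' : x.1 ∈ ks := by rcases List.mem_cons.mp hmem with h | h; exact absurd h hx; exact h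
      have hxlt : x.1 < k := hks _ hmem'
      have hA : ∀ y ∈ xs.filter (fun p => p.1 == k), (decide ((-x.1 : Int) < -y.1)) = false := by
        intro y hy
        have : y.1 = k := by simpa using (List.mem_filter.mp hy).2
        simp [this]; omega
      rw [List.flatMap_cons, pv_insertBy_pass _ _ _ _ hA,
          ih (List.pairwise_cons.mp hpw).2 hmem']
      rw [List.flatMap_cons, hfx k]
      simp [hx]

-- the stable sort by descending score is the concatenation of the score buckets, high to low
theorem pv_sorted_eq_buckets (n : Int) (scored : List (Int × String))
    (hb : ∀ p ∈ scored, 0 ≤ p.1 ∧ p.1 ≤ n) :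
    PySem.List.sorted scored (fun x => -x.1)
      = (PySem.List.pyRange n (-1) (-1)).flatMap (fun k => scored.filter (fun p => p.1 == k)) := by
  have hpw : (PySem.List.pyRange n (-1) (-1)).Pairwise (fun a b => b < a) := by
    rw [PySem.List.pyRange_neg_one_eq_reverse, List.pairwise_reverse]
    exact PySem.List.pairwise_lt_pyRange_one _ _
  induction scored using List.reverseRecOn with
  | nil => simp [PySem.List.sorted_eq_foldl_insertBy]
  | append_singleton xs x ih =>
    have h1 : PySem.List.sorted (xs ++ [x]) (fun x => -x.1)
        = PySem.List.insertBy (fun a b => decide ((-a.1 : Int) < -b.1)) x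
            (PySem.List.sorted xs (fun x => -x.1)) := by
      rw [PySem.List.sorted_eq_foldl_insertBy, PySem.List.sorted_eq_foldl_insertBy,
        List.foldl_append, List.foldl_cons, List.foldl_nil]
    rcases hb x (by simp) with ⟨hx0, hxn⟩
    rw [h1, ih (fun p hp => hb p (by simp [hp]))]
    exact pv_ins_flatMap x xs _ hpw (PySem.List.mem_pyRange_neg_one.mpr ⟨by omega, hxn⟩)

set_option maxHeartbeats 1000000 in
theorem prioritize_lines_spec : Claim_equal_prioritize_lines := by
  intro lines focus_terms _
  unfold Spec_prioritize_lines prioritize_lines prioritize_lines_alt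
  simp only [List.foldl_map, List.length_map]
  rw [PySem.List.foldl_append_eq_flatMap, PySem.List.foldl_append_eq_flatMap,
    List.nil_append, List.nil_append]
  apply pv_sorted_eq_buckets
  intro p hp
  rcases List.mem_flatMap.mp hp with ⟨line, _, hpl⟩
  simp only [List.mem_singleton] at hpl
  have hsb := pv_score_bounds focus_terms
    (fun term => PySem.Str.isIn (PySem.Str.lower term) (PySem.Str.lower line)) 0
  rw [hpl]
  dsimp only
  exact ⟨hsb.1, by simpa using hsb.2⟩
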